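-- pv_equiv track=rewrite | github.com/JDL05/Co-Investor-xdeck | app.py | create_co_investment_pairs
-- ===== SOURCE A (Python) =====
-- def create_co_investment_pairs(investors):
--     """
--     Creates all possible (Investor A, Investor B) pairs from a list of investors.
--     """
--     pairs = []
--     for i in range(len(investors)):
--         for j in range(i + 1, len(investors)):
--             a = investors[i].strip()
--             b = investors[j].strip()
--             if a and b:
--                 pairs.append((a, b))
--     return pairs
-- ===== SOURCE B (Python) =====
-- def create_co_investment_pairs(investors):
--     """
--     Creates all possible (Investor A, Investor B) pairs from a list of investors.
--     Two-pass decomposition: first filter/strip into `cleaned`, then pair by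
--     peeling the head off the cleaned list with no guard in the pairing loop.
--     """
--     cleaned = [s.strip() for s in investors if s.strip()]
--     pairs = []
--     rest = cleaned
--     while rest:
--         a, rest = rest[0], rest[1:]
--         pairs.extend((a, b) for b in rest)
--     return pairs
-- ===== Notes on version B (the rewrite author's own statement) =====
-- stated objective: simpler
-- what changed: A fuses stripping, the non-empty guard and pairing into one nested index loop over the raw list; B first filters/strips once into a cleaned list and then pairs by head/tail peeling with no guard and no index arithmetic.
import Mathlib
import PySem

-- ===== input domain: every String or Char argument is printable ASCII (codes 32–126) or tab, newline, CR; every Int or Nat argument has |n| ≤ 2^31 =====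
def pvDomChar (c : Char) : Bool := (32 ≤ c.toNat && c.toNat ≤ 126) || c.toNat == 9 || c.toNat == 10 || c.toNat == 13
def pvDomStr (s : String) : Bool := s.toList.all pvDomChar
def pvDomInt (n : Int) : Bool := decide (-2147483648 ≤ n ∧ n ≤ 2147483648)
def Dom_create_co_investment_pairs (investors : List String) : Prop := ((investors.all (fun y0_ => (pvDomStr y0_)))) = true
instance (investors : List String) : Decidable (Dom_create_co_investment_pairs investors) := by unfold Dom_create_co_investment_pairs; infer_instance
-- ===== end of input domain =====

-- B replaces A's fused nested index loop (strip + guard + pair in one pass) by a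
-- filter/strip pass followed by guard-free head/tail pairing; objective: simpler.

-- ===== PORT A =====
-- 'for i in range(len(investors))' / 'for j in range(i+1, n)' become folds over
-- List.range n and List.range' (i+1) (n-(i+1)); indices are always in range, so
-- investors[i] is ported as getD with a dummy default. 'if a and b' is string
-- truthiness: both non-empty.
def create_co_investment_pairs (investors : List String) : List (String × String) :=
  (List.range investors.length).foldl (fun pairs i =>
    (List.range' (i + 1) (investors.length - (i + 1))).foldl (fun pairs j =>
      let a := PySem.Str.strip (investors.getD i "")
      let b := PySem.Str.strip (investors.getD j "")
      if a ≠ "" ∧ b ≠ "" then pairs ++ [(a, b)] else pairs) pairs) []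

-- ===== PORT B =====
-- '[s.strip() for s in investors if s.strip()]'
def pvClean : List String → List String
  | [] => []
  | s :: t =>
      let a := PySem.Str.strip s
      if a ≠ "" then a :: pvClean t else pvClean t

-- the while-loop peeling 'a, rest = rest[0], rest[1:]' and extending with (a, b) for b in rest
def pvPairs : List String → List (String × String)
  | [] => []
  | a :: rest => rest.map (fun b => (a, b)) ++ pvPairs rest

def create_co_investment_pairs_alt (investors : List String) : List (String × String) :=
  pvPairs (pvClean investors)

-- ===== PRECONDITION & SPEC =====
def Spec_create_co_investment_pairs (investors : List String) (out : List (String × String)) : Prop := out = create_co_investment_pairs_alt investors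
instance (investors : List String) (out : List (String × String)) : Decidable (Spec_create_co_investment_pairs investors out) := by unfold Spec_create_co_investment_pairs; infer_instance

-- ===== CLAIM (what is proved, stated in full; the proofs are below) =====
def Claim_equal_create_co_investment_pairs : Prop := ∀ (investors : List String), Dom_create_co_investment_pairs investors → Spec_create_co_investment_pairs investors (create_co_investment_pairs investors)

-- ===== LEMMAS AND PROOFS =====

-- reading xs by index over range' s (|xs| - s) is just drop s xs
theorem pv_map_getD_range' (xs : List String) (s : Nat) :
    (List.range' s (xs.length - s)).map (fun j => xs.getD j "") = xs.drop s := by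
  apply List.ext_getElem
  · simp
  · intro k h1 h2
    simp only [List.getElem_map, List.getElem_range', List.getElem_drop]
    have hk : s + k < xs.length := by simp at h2; omega
    rw [List.getD_eq_getElem _ _ (by omega)]
    congr 1
    omega

-- pvClean is filter-of-map
theorem pvClean_eq (xs : List String) :
    pvClean xs = (xs.map PySem.Str.strip).filter (fun a => a ≠ "") := by
  induction xs with
  | nil => rfl
  | cons x t ih =>
    by_cases h : PySem.Str.strip x ≠ ""
    · simp [pvClean, h, ih]
    · simp [pvClean, h, ih]

-- the per-index block A contributes for index i
def pvBlock (xs : List String) (i : Nat) : List (String × String) :=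
  if PySem.Str.strip (xs.getD i "") ≠ "" then
    (((xs.drop (i + 1)).map PySem.Str.strip).filter (fun b => b ≠ "")).map
      (fun b => (PySem.Str.strip (xs.getD i ""), b))
  else []

theorem pv_pos_case (xs : List String) (i : Nat) (a : String)
    (ha : a = PySem.Str.strip (xs.getD i "")) (h : a ≠ "") :
    List.map (fun j => (a, PySem.Str.strip (xs.getD j "")))
      (List.filter (fun x => decide (a ≠ "" ∧ PySem.Str.strip (xs.getD x "") ≠ ""))
        (List.range' (i + 1) (xs.length - (i + 1)))) =
    List.map (fun b => (PySem.Str.strip (xs.getD i ""), b))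
      (List.filter (fun b => decide (b ≠ ""))
        (List.map PySem.Str.strip
          (List.map (fun j => xs.getD j "") (List.range' (i + 1) (xs.length - (i + 1)))))) := by
  rw [List.map_map, List.filter_map, List.map_map]
  simp only [Function.comp_def, ← ha]
  congr 1
  exact List.filter_congr (fun x _ => by simp [h])

theorem pv_inner_fold (xs : List String) (i : Nat) (acc : List (String × String)) :
    (List.range' (i + 1) (xs.length - (i + 1))).foldl (fun pairs j =>
      let a := PySem.Str.strip (xs.getD i "")
      let b := PySem.Str.strip (xs.getD j "")
      if a ≠ "" ∧ b ≠ "" then pairs ++ [(a, b)] else pairs) acc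
    = acc ++ pvBlock xs i := by
  rw [PySem.List.foldl_append_ite
      (p := fun j => PySem.Str.strip (xs.getD i "") ≠ "" ∧ PySem.Str.strip (xs.getD j "") ≠ "")
      (f := fun j => (PySem.Str.strip (xs.getD i ""), PySem.Str.strip (xs.getD j "")))]
  congr 1
  unfold pvBlock
  by_cases h : PySem.Str.strip (xs.getD i "") ≠ ""
  · rw [if_pos h]
    rw [← pv_map_getD_range' xs (i + 1)]
    exact pv_pos_case xs i _ rfl h
  · rw [if_neg h]
    rw [List.filter_eq_nil_iff.mpr]
    · simp
    · intro j _
      rw [decide_eq_true_eq]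
      push Not at h
      exact fun hc => hc.1 h

theorem pv_A_eq_flatMap (xs : List String) :
    create_co_investment_pairs xs = (List.range xs.length).flatMap (pvBlock xs) := by
  unfold create_co_investment_pairs
  refine Eq.trans (PySem.List.foldl_congr_mem _ _ (fun pairs i => pairs ++ pvBlock xs i) _ ?_) ?_
  · intro acc i _; exact pv_inner_fold xs i acc
  · rw [PySem.List.foldl_append_eq_flatMap]; simp

theorem pvBlock_cons_succ (x : String) (t : List String) (i : Nat) :
    pvBlock (x :: t) (i + 1) = pvBlock t i := rfl

theorem pv_flatMap_eq_pairs (xs : List String) :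
    (List.range xs.length).flatMap (pvBlock xs) = pvPairs (pvClean xs) := by
  induction xs with
  | nil => rfl
  | cons x t ih =>
    rw [List.length_cons, List.range_succ_eq_map, List.flatMap_cons, List.flatMap_map]
    have hshift : (List.range t.length).flatMap (fun i => pvBlock (x :: t) (i + 1))
        = pvPairs (pvClean t) := by
      rw [← ih]; exact List.flatMap_congr (fun i _ => pvBlock_cons_succ x t i)
    rw [hshift]
    show pvBlock (x :: t) 0 ++ pvPairs (pvClean t) = pvPairs (pvClean (x :: t))
    simp only [pvClean]
    by_cases h : PySem.Str.strip x ≠ ""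
    · rw [if_pos h]
      show pvBlock (x :: t) 0 ++ pvPairs (pvClean t)
        = (pvClean t).map (fun b => (PySem.Str.strip x, b)) ++ pvPairs (pvClean t)
      congr 1
      unfold pvBlock
      simp only [List.getD_cons_zero, List.drop_succ_cons, List.drop_zero, if_pos h]
      rw [pvClean_eq]
    · rw [if_neg h]
      unfold pvBlock
      simp only [List.getD_cons_zero]
      rw [if_neg h]
      simp

-- ===== VERDICT (by name: the statement is the Claim_ definition above) =====
theorem create_co_investment_pairs_spec : Claim_equal_create_co_investment_pairs := by
  intro investors _
  show create_co_investment_pairs investors = create_co_investment_pairs_alt investors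
  rw [pv_A_eq_flatMap, pv_flatMap_eq_pairs]
  rfl
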